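-- pv_equiv track=rewrite | github.com/ewhuang/parecat_bcb16 | his/get_time_series_statistics.py | combine_vectors
-- ===== SOURCE A (Python) =====
-- def combine_vectors(vec_lst):
--     len_lst = [len(vec) for vec in vec_lst]
--     longest_list_length = max(len_lst)
--     for i, vec in enumerate(vec_lst):
--         # Perform 0 augmentation as necessary.
--         vec_lst[i] = [int(ele) for ele in vec]
--         vec_len = len(vec)
--         if vec_len < longest_list_length:
--             diff = longest_list_length - vec_len
--             vec_lst[i] += [0] * diff
--     # Sum together the lists, element-wise.
--     result = [0] * longest_list_length
--     for vec in vec_lst: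
--         result = [result[i] + vec[i] for i in range(longest_list_length)]
--     return result
-- ===== SOURCE B (Python) =====
-- def combine_vectors(vec_lst):
--     # Single streaming pass: add each row into a growing accumulator (no max(),
--     # no pre-padding for the sum); a final pass pads the argument rows in place
--     # to preserve A's observable mutation of vec_lst.
--     result = []
--     for i, vec in enumerate(vec_lst):
--         row = [int(ele) for ele in vec]
--         vec_lst[i] = row
--         j = 0
--         for ele in row:
--             if j < len(result):
--                 result[j] += ele
--             else:
--                 result.append(ele)
--             j += 1
--     for i, row in enumerate(vec_lst):
--         vec_lst[i] = row + [0] * (len(result) - len(row))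
--     return result
-- ===== Notes on version B (the rewrite author's own statement) =====
-- stated objective: alternative
-- what changed: B replaces A's max-then-pad-then-repeatedly-rebuild scheme with a single streaming pass that adds each row into a growing accumulator (extending it when a row is longer), padding the argument rows in place only afterwards for the side effect.
import Mathlib
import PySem

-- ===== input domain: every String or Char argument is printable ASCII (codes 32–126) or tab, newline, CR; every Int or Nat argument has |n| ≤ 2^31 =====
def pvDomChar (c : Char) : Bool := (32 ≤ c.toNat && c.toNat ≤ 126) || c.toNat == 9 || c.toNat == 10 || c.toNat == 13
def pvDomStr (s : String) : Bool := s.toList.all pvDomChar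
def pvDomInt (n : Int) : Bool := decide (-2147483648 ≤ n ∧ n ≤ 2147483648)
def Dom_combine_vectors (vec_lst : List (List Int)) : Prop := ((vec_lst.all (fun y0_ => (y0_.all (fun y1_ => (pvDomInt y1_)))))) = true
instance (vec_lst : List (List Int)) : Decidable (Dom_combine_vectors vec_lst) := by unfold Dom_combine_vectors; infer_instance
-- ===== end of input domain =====

-- B streams the rows once into a growing accumulator (no max(), no pre-padding for the sum)
-- instead of A's max-then-pad-then-repeatedly-rebuild; same cost. Both Pythons mutate the
-- argument in place identically; the equivalence proved here is about the return value.

-- ===== PORT A =====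
def combine_vectors (vec_lst : List (List Int)) : List Int :=
  let len_lst := vec_lst.map (fun vec => (vec.length : Int))
  match PySem.List.max? len_lst (fun x => x) with
  | none => []   -- Python raises ValueError (max of empty); excluded by Pre_
  | some longest =>
    let L := longest.toNat
    -- first loop: int-convert (identity on Int) and zero-pad the short rows
    let padded := vec_lst.map (fun vec =>
      let v2 := vec.map (fun ele => ele)
      if vec.length < L then v2 ++ List.replicate (L - vec.length) 0 else v2)
    -- second loop: rebuild result from scratch for each row (indices are in range, so getD is exact)
    let result := List.replicate L (0 : Int)
    padded.foldl (fun result vec =>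
      (List.range L).map (fun i => result.getD i 0 + vec.getD i 0)) result

-- ===== PORT B =====
-- inner loop of Source B: add one row into the accumulator, growing it as needed (j is the running index)
def combine_vectors_addRow : List Int → Nat → List Int → List Int
  | result, _, [] => result
  | result, j, ele :: rest =>
      combine_vectors_addRow
        (if j < result.length then result.set j (result.getD j 0 + ele) else result ++ [ele])
        (j + 1) rest

-- Source B's final loop only pads the argument rows in place (a side effect on vec_lst); it does not
-- touch `result`, so the return value is the accumulator alone.
def combine_vectors_alt (vec_lst : List (List Int)) : List Int :=
  vec_lst.foldl (fun result vec =>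
    combine_vectors_addRow result 0 (vec.map (fun ele => ele))) []

-- ===== PRECONDITION & SPEC =====
-- Pre_ excludes only the empty list, on which Python's max([...]) in A raises ValueError.
def Pre_combine_vectors (vec_lst : List (List Int)) : Prop := vec_lst ≠ []
instance (vec_lst : List (List Int)) : Decidable (Pre_combine_vectors vec_lst) := by unfold Pre_combine_vectors; infer_instance
def pvWitness_combine_vectors : List (List Int) := [[1, 2, 3], [4], []]

def Spec_combine_vectors (vec_lst : List (List Int)) (out : List Int) : Prop := out = combine_vectors_alt vec_lst
instance (vec_lst : List (List Int)) (out : List Int) : Decidable (Spec_combine_vectors vec_lst out) := by unfold Spec_combine_vectors; infer_instance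

-- ===== CLAIM (what is proved, stated in full; the proofs are below) =====
def Claim_equal_combine_vectors : Prop := ∀ (vec_lst : List (List Int)), Dom_combine_vectors vec_lst → Pre_combine_vectors vec_lst → Spec_combine_vectors vec_lst (combine_vectors vec_lst)

-- ===== LEMMAS AND PROOFS =====

-- the column sum B accumulates (shared vocabulary of the two characterisations)
def pvColSum (vs : List (List Int)) (i : Nat) : Int :=
  (vs.map (fun vec => vec.getD i 0)).foldl (· + ·) 0

theorem foldl_add_shift : ∀ (xs : List Int) (a b : Int),
    xs.foldl (· + ·) (a + b) = a + xs.foldl (· + ·) b := by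
  intro xs
  induction xs with
  | nil => intro a b; rfl
  | cons x xs ihx => intro a b; simp only [List.foldl_cons, add_assoc]; exact ihx a (b + x)

theorem getD_map_range {f : Nat → Int} {L i : Nat} (h : i < L) :
    ((List.range L).map f).getD i 0 = f i := by
  simp [List.getD, h]

-- A's accumulation loop computes the column sums (over the padded rows).
theorem foldA_eq (L : Nat) (vs : List (List Int)) : ∀ (f : Nat → Int),
    vs.foldl (fun result vec => (List.range L).map (fun i => result.getD i 0 + vec.getD i 0))
      ((List.range L).map f)
    = (List.range L).map (fun i => f i + pvColSum vs i) := by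
  induction vs with
  | nil => intro f; simp [pvColSum]
  | cons v vs ih =>
    intro f
    have h1 : (List.range L).map
        (fun i => ((List.range L).map f).getD i 0 + v.getD i 0)
        = (List.range L).map (fun i => f i + v.getD i 0) := by
      apply List.map_congr_left
      intro i hi
      rw [getD_map_range (List.mem_range.mp hi)]
    simp only [List.foldl_cons, h1, ih]
    apply List.map_congr_left
    intro i _
    simp only [pvColSum, List.map_cons, List.foldl_cons, zero_add]
    rw [add_assoc, ← foldl_add_shift, add_zero]

theorem replicate_as_map (L : Nat) :
    (List.replicate L (0 : Int)) = (List.range L).map (fun _ => (0 : Int)) := by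
  simp [List.map_const']

-- length of B's inner loop: the accumulator grows to max of the two lengths
theorem addRow_len : ∀ (row result : List Int) (j : Nat), j ≤ result.length →
    (combine_vectors_addRow result j row).length = max result.length (j + row.length) := by
  intro row
  induction row with
  | nil => intro result j h; simp [combine_vectors_addRow]; omega
  | cons ele rest ih =>
    intro result j h
    rw [combine_vectors_addRow]
    by_cases hc : j < result.length
    · rw [if_pos hc, ih _ _ (by simp; omega)]
      simp; omega
    · rw [if_neg hc, ih _ _ (by simp; omega)]
      simp; omega

-- getD after a single in-range set / a single append
theorem getD_set_eq (result : List Int) (j i : Nat) (x : Int) (hc : j < result.length) :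
    (result.set j x).getD i 0 = if i = j then x else result.getD i 0 := by
  rcases eq_or_ne i j with rfl | hij
  · simp [List.getD, hc]
  · simp [List.getD, hij, (Ne.symm hij : j ≠ i)]

theorem getD_append_single (result : List Int) (ele : Int) (i : Nat) :
    (result ++ [ele]).getD i 0 = if i = result.length then ele else result.getD i 0 := by
  rcases eq_or_ne i result.length with rfl | hij
  · simp [List.getD]
  · by_cases hlt : i < result.length
    · simp [List.getD, List.getElem?_append_left hlt, hij]
    · simp [List.getD, hij, List.getElem?_eq_none (by omega : result.length ≤ i),
        List.getElem?_eq_none (by simp; omega : (result ++ [ele]).length ≤ i)]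

-- value of B's inner loop at any index
theorem addRow_getD : ∀ (row result : List Int) (j : Nat), j ≤ result.length → ∀ (i : Nat),
    (combine_vectors_addRow result j row).getD i 0
      = result.getD i 0 + (if j ≤ i then row.getD (i - j) 0 else 0) := by
  intro row
  induction row with
  | nil =>
    intro result j h i
    simp [combine_vectors_addRow]
  | cons ele rest ih =>
    intro result j h i
    rw [combine_vectors_addRow]
    by_cases hc : j < result.length
    · rw [if_pos hc, ih _ _ (by simp; omega), getD_set_eq _ _ _ _ hc]
      rcases eq_or_ne i j with rfl | hij
      · simp
      · by_cases hji : j ≤ i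
        · have hsub : i - j = (i - (j + 1)) + 1 := by omega
          simp [hij, hji, (by omega : j + 1 ≤ i), hsub]
        · simp [hij, hji]
          exact fun hlt => absurd hlt (by omega)
    · have hj : j = result.length := by omega
      rw [if_neg hc, ih _ _ (by simp; omega), getD_append_single]
      rcases eq_or_ne i j with rfl | hij
      · simp [hj]
      · have hne : i ≠ result.length := by omega
        by_cases hji : j ≤ i
        · have hsub : i - j = (i - (j + 1)) + 1 := by omega
          simp [hne, hji, (by omega : j + 1 ≤ i), hsub]
        · simp [hne, hji]
          exact fun hlt => absurd hlt (by omega)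

-- B's outer fold: length is the running max of the row lengths …
theorem foldB_len : ∀ (vs : List (List Int)) (acc : List Int),
    (vs.foldl (fun result vec => combine_vectors_addRow result 0 (vec.map (fun ele => ele))) acc).length
      = vs.foldl (fun m vec => max m vec.length) acc.length := by
  intro vs
  induction vs with
  | nil => intro acc; rfl
  | cons v vs ih =>
    intro acc
    simp only [List.foldl_cons, ih, addRow_len (v.map (fun ele => ele)) acc 0 (Nat.zero_le _)]
    simp

-- … and each entry is the column sum
theorem foldB_getD : ∀ (vs : List (List Int)) (acc : List Int) (i : Nat),
    (vs.foldl (fun result vec => combine_vectors_addRow result 0 (vec.map (fun ele => ele))) acc).getD i 0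
      = acc.getD i 0 + pvColSum vs i := by
  intro vs
  induction vs with
  | nil => intro acc i; simp [pvColSum]
  | cons v vs ih =>
    intro acc i
    simp only [List.foldl_cons, ih, addRow_getD (v.map (fun ele => ele)) acc 0 (Nat.zero_le _) i]
    simp only [pvColSum, List.map_cons, List.foldl_cons, zero_add]
    rw [add_assoc, ← foldl_add_shift, add_zero]
    simp

-- padding with zeros does not change getD with default 0
theorem getD_append_zeros (v : List Int) (k i : Nat) :
    (v ++ List.replicate k 0).getD i 0 = v.getD i 0 := by
  by_cases hlt : i < v.length
  · simp [List.getD, List.getElem?_append_left hlt]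
  · by_cases h2 : i < v.length + k
    · simp [List.getD, List.getElem?_append_right (by omega : v.length ≤ i),
        (by omega : i - v.length < k),
        List.getElem?_eq_none (by omega : v.length ≤ i)]
    · rw [List.getD, List.getD,
        List.getElem?_eq_none (by simp; omega : (v ++ List.replicate k 0).length ≤ i),
        List.getElem?_eq_none (by omega : v.length ≤ i)]

-- the running max of the row lengths, cast to Int, is Python's max() of the length list
theorem fold_max_cast : ∀ (vs : List (List Int)) (a : Nat),
    (vs.map (fun vec => (vec.length : Int))).foldl max (a : Int)
      = ((vs.foldl (fun m vec => max m vec.length) a : Nat) : Int) := by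
  intro vs
  induction vs with
  | nil => intro a; rfl
  | cons v vs ih =>
    intro a
    simp only [List.map_cons, List.foldl_cons, ← Nat.cast_max]
    exact ih _

-- ===== VERDICT (by name: the statement is the Claim_ definition above) =====
theorem combine_vectors_spec : Claim_equal_combine_vectors := by
  intro vec_lst _ hpre
  unfold Spec_combine_vectors combine_vectors combine_vectors_alt
  cases h : PySem.List.max? (vec_lst.map (fun vec => (vec.length : Int))) (fun x => x) with
  | none =>
    rw [PySem.List.max?_eq_none_iff] at h
    exact absurd (by simpa using h) hpre
  | some longest =>
    simp only [h]
    have hmax := PySem.List.max?_isMax h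
    set L := longest.toNat with hL
    -- A's conditionally padded rows equal unconditional zero-padding
    have hpad : vec_lst.map (fun vec =>
          let v2 := vec.map (fun ele => ele)
          if vec.length < L then v2 ++ List.replicate (L - vec.length) 0 else v2)
        = vec_lst.map (fun vec => vec ++ List.replicate (L - vec.length) 0) := by
      apply List.map_congr_left
      intro v hv
      by_cases hc : v.length < L
      · simp [hc]
      · have hle : (v.length : Int) ≤ longest := hmax _ (List.mem_map_of_mem hv)
        have : L - v.length = 0 := by omega
        simp [hc, this]
    rw [hpad, replicate_as_map, foldA_eq]
    -- the running max of the row lengths is L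
    have hfold : vec_lst.foldl (fun m vec => max m vec.length) 0 = L := by
      cases vec_lst with
      | nil => exact absurd rfl hpre
      | cons v rest =>
        rw [List.map_cons, PySem.List.max?_id_cons] at h
        have hlon : longest = ((rest.foldl (fun m vec => max m vec.length) v.length : Nat) : Int) := by
          rw [← fold_max_cast]; exact (Option.some.inj h).symm
        simp only [List.foldl_cons]
        rw [(by omega : max 0 v.length = v.length), hL, hlon]
        simp
    have hlen : (vec_lst.foldl (fun result vec => combine_vectors_addRow result 0 (vec.map (fun ele => ele))) []).length = L := by
      rw [foldB_len]; exact hfold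
    -- both sides are lists of length L whose i-th entry is the column sum of vec_lst
    apply List.ext_getElem
    · simp only [List.length_map, List.length_range, hlen]
    · intro i hi hi2
      have hiL : i < L := by simpa using hi
      have hA : ((List.range L).map (fun i => (0 : Int) + pvColSum (vec_lst.map (fun vec => vec ++ List.replicate (L - vec.length) 0)) i))[i]'hi
          = 0 + pvColSum (vec_lst.map (fun vec => vec ++ List.replicate (L - vec.length) 0)) i := by
        simp
      have hB : (vec_lst.foldl (fun result vec => combine_vectors_addRow result 0 (vec.map (fun ele => ele))) [])[i]'hi2
          = (vec_lst.foldl (fun result vec => combine_vectors_addRow result 0 (vec.map (fun ele => ele))) []).getD i 0 := by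
        rw [List.getD, List.getElem?_eq_getElem hi2]; rfl
      rw [hA, hB, foldB_getD]
      have hcol : pvColSum (vec_lst.map (fun vec => vec ++ List.replicate (L - vec.length) 0)) i = pvColSum vec_lst i := by
        unfold pvColSum
        rw [List.map_map]
        congr 1
        apply List.map_congr_left
        intro v _
        exact getD_append_zeros v _ i
      simp [hcol]
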